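-- pv_equiv track=rewrite | github.com/basilegraf/parkingfrenzy | faa_di_bruno.py | composition_rule
-- ===== SOURCE A (Python) =====
-- def binomial(n, k):
--     """
--     Binomial coefficient (n k)
--     """
--     if not 0 <= k <= n:
--         return 0
--     b = 1
--     for t in range(min(k, n-k)):
--         b *= n
--         b //= t+1
--         n -= 1
--     return b
--
-- def bell(n,k,x):
--     """
--     Evaluate the partial exponential Bell polynomial B_n,k(x)
--     """
--     if (n==0) & (k==0):
--         return 1
--     elif (k==0) | (n==0):
--         return 0
--     else:
--         b = 0
--         for i in range(n-k+1):
--             b += binomial(n-1, i) * x[i] * bell(n-i-1, k-1, x)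
--         return b
--
-- def composition_rule_nth(f,g):
--     """
--     Compute the n-th derivative of f(g(x)) w.r.t. x given the
--     list of derivatives of f at g(x) and of g at x using
--     Faa di Bruno's formula and Bell polynomials.
--     Parameters:
--
--         f : list of derivatives of f. f = [f^(1)(g(x)), ..., f^(n)(g(x))]
--
--         g : list of derivatives of g. g = [g^(1)(x),    ..., g^(n)(x)]
--     """
--     assert (len(f) == len(g)), "Lists of derivatives of f and g must be of the same length"
--     n = len(f)
--     dfg = 0
--     for k in range(n):
--         dfg += f[k] * bell(n, k+1, g[:n-k])
--     return dfg
--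
-- def composition_rule(f,g):
--     """
--     Compute the derivatives of f(g(x)) w.r.t. x given the
--     list of derivatives of f at g(x) and of g at x using
--     Faa di Bruno's formula and Bell polynomials.
--     Parameters:
--
--         f : list of derivatives of f. f = [f^(0)(g(x)), f^(1)(g(x)), ..., f^(n)(g(x))]
--
--         g : list of derivatives of g. g = [g^(0)(x),    g^(1)(x),    ..., g^(n)(x)]
--     compute the list
--         h : list of derivatives of h. h = [h^(0)(x),    h^(1)(x),    ..., h^(n)(x)]
--     where h(x) = f(g(x))
--     """
--     assert (len(f) == len(g)), "Lists of derivatives of f and g must be of the same length"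
--     n = len(f)
--     h = [0] * n
--     h[0] = f[0]
--     for k in range(1,n):
--         h[k] = composition_rule_nth(f[1:k+1], g[1:k+1])
--     return h
-- ===== SOURCE B (Python) =====
-- def composition_rule(f, g):
--     """Same derivatives of f(g(x)) via Faa di Bruno, but with the Bell
--     polynomial values tabulated bottom-up (one shared DP table over g[1:])
--     and binomials from Pascal's triangle, instead of A's exponential
--     recursion recomputed for every order."""
--     assert (len(f) == len(g)), "Lists of derivatives of f and g must be of the same length"
--     n = len(f)
--     x = g[1:]
--     m = n - 1
--     # Pascal's triangle rows C[r][i] = binomial(r, i), r = 0..m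
--     C = [[1]]
--     for r in range(1, m + 1):
--         prev = C[-1]
--         C.append([1] + [prev[i - 1] + prev[i] for i in range(1, r)] + [1])
--     # Bell table T[nn][kk] = B_{nn,kk}(x), padded with zeros to (m+1) columns
--     T = [[1] + [0] * m]
--     for nn in range(1, m + 1):
--         T.append([0] + [sum(C[nn - 1][i] * x[i] * T[nn - 1 - i][kk - 1]
--                             for i in range(nn - kk + 1)) if kk <= nn else 0
--                         for kk in range(1, m + 1)])
--     return [f[0]] + [sum(f[kk] * T[k][kk] for kk in range(1, k + 1))
--                      for k in range(1, n)]
-- ===== Notes on version B (the rewrite author's own statement) =====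
-- stated objective: faster
-- what changed: B replaces A's exponential recomputation of bell(n,k) (recomputed recursively for every derivative order) by one bottom-up DP table of Bell polynomial values over g[1:] shared by all orders, with binomials read off Pascal's triangle instead of A's multiplicative loop.
import Mathlib
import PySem

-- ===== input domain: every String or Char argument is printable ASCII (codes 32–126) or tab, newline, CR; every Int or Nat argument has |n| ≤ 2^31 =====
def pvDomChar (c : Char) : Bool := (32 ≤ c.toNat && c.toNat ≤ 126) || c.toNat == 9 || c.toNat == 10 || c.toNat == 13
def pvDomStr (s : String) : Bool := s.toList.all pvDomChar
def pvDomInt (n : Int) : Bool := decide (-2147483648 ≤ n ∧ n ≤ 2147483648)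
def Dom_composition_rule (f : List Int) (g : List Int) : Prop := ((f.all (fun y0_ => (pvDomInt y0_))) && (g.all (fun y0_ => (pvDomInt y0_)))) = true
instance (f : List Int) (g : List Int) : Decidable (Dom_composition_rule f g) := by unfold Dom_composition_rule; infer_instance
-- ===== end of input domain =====

-- B tabulates the Bell polynomial values bottom-up (one shared DP table) with Pascal-triangle
-- binomials, instead of A's exponential recursion; return value equal on Pre_ (len f = len g, f ≠ []).

-- ===== PORT A =====
-- binomial(n, k): the multiplicative loop, state (b, n) mutated in place.
def binomial (n k : Int) : Int :=
  if ¬(0 ≤ k ∧ k ≤ n) then 0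
  else
    ((PySem.List.pyRange 0 (min k (n - k)) 1).foldl
      (fun (s : Int × Int) t => (PySem.Int.floordiv (s.1 * s.2) (t + 1), s.2 - 1))
      (1, n)).1

-- bell(n, k, x): Python's bell is only ever called (from composition_rule) with n, k ≥ 0, so it is
-- ported on Nat; x[i] is always in range in those calls, ported as getD (Python would raise out of range);
-- range(n-k+1) is computed in Int and clamped by toNat, exactly Python's empty range for n-k+1 <= 0.
def bell (n k : Nat) (x : List Int) : Int :=
  if n = 0 ∧ k = 0 then 1
  else if k = 0 ∨ n = 0 then 0
  else (List.range ((n - k + 1 : Int)).toNat).foldl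
        (fun b (i : Nat) => b + binomial ((n : Int) - 1) (i : Int) * x.getD i 0 * bell (n - i - 1) (k - 1) x) 0
termination_by n
decreasing_by omega

-- composition_rule_nth(f, g): g[:n-k] with 0 ≤ n-k is List.take (n-k) (exact: nonnegative stop).
def composition_rule_nth (f g : List Int) : Int :=
  let n := f.length
  (List.range n).foldl (fun dfg k => dfg + f.getD k 0 * bell n (k + 1) (g.take (n - k))) 0

-- h = [0]*n; h[0] = f[0] (IndexError on empty f: outside Pre_, port returns []);
-- h[k] = composition_rule_nth(f[1:k+1], g[1:k+1]) for k in range(1, n).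
def composition_rule (f : List Int) (g : List Int) : List Int :=
  match f with
  | [] => []
  | f0 :: _ =>
    f0 :: (List.range (f.length - 1)).map (fun j =>
      composition_rule_nth ((f.drop 1).take (j + 1)) ((g.drop 1).take (j + 1)))

-- ===== PORT B =====
-- Pascal's triangle rows 0..m: C[r] = [1] + [prev[i-1]+prev[i] for i in range(1,r)] + [1].
def pascalRows (m : Nat) : List (List Int) :=
  (List.range m).foldl
    (fun C r1 =>
      let prev := C.getLastD []
      C ++ [(1 : Int) :: ((List.range r1).map (fun i0 => prev.getD i0 0 + prev.getD (i0 + 1) 0) ++ [1])])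
    [[1]]

-- Bell table rows 0..m over x; row nn = [0] + [sum(...) if kk ≤ nn else 0 for kk in 1..m].
def bellTable (C : List (List Int)) (x : List Int) (m : Nat) : List (List Int) :=
  (List.range m).foldl
    (fun T nn1 =>
      let nn := nn1 + 1
      T ++ [(0 : Int) :: (List.range m).map (fun kk1 =>
        let kk := kk1 + 1
        if kk ≤ nn then
          ((List.range (nn - kk + 1)).map (fun i =>
            (C.getD (nn - 1) []).getD i 0 * x.getD i 0 * (T.getD (nn - 1 - i) []).getD (kk - 1) 0)).sum
        else 0)])
    [(1 : Int) :: List.replicate m 0]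

def composition_rule_alt (f : List Int) (g : List Int) : List Int :=
  match f with
  | [] => []
  | f0 :: _ =>
    let n := f.length
    let x := g.drop 1
    let m := n - 1
    let C := pascalRows m
    let T := bellTable C x m
    f0 :: (List.range (n - 1)).map (fun k1 =>
      let k := k1 + 1
      ((List.range k).map (fun kk1 =>
        let kk := kk1 + 1
        f.getD kk 0 * (T.getD k []).getD kk 0)).sum)

-- ===== PRECONDITION & SPEC =====
-- Pre_ excludes exactly the inputs where Python A raises: AssertionError on len(f) ≠ len(g),
-- IndexError (h[0] = f[0]) on empty lists.
def Pre_composition_rule (f : List Int) (g : List Int) : Prop := f.length = g.length ∧ f ≠ []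
instance (f : List Int) (g : List Int) : Decidable (Pre_composition_rule f g) := by unfold Pre_composition_rule; infer_instance
def pvWitness_composition_rule : List Int × List Int := ([2, 3, 5], [1, 4, 6])

def Spec_composition_rule (f : List Int) (g : List Int) (out : List Int) : Prop := out = composition_rule_alt f g
instance (f : List Int) (g : List Int) (out : List Int) : Decidable (Spec_composition_rule f g out) := by unfold Spec_composition_rule; infer_instance

-- ===== CLAIM (what is proved, stated in full; the proofs are below) =====
def Claim_equal_composition_rule : Prop := ∀ (f : List Int) (g : List Int), Dom_composition_rule f g → Pre_composition_rule f g → Spec_composition_rule f g (composition_rule f g)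

-- ===== LEMMAS AND PROOFS =====

theorem bell_k_zero (n : Nat) (x : List Int) : bell n 0 x = if n = 0 then 1 else 0 := by
  rw [bell]; split_ifs with h1 h2 h3 <;> simp_all

theorem binom_loop (n : Nat) : ∀ (s : Nat), s ≤ n →
    (((List.range s).map (fun t : Nat => (t : Int))).foldl
      (fun (p : Int × Int) t => (PySem.Int.floordiv (p.1 * p.2) (t + 1), p.2 - 1))
      (1, (n : Int)))
    = ((n.choose s : Int), ((n - s : Nat) : Int)) := by
  intro s hs
  induction s with
  | zero => simp
  | succ s ih =>
    rw [List.range_succ, List.map_append, List.foldl_append, ih (by omega)]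
    simp only [List.map_cons, List.map_nil, List.foldl_cons, List.foldl_nil]
    have h1 : ((n.choose s : Int)) * ((n - s : Nat) : Int) = ((n.choose s * (n - s) : Nat) : Int) := by
      push_cast; ring
    have h2 : ((s : Int) + 1) = ((s + 1 : Nat) : Int) := by push_cast; ring
    have h3 : n.choose s * (n - s) = n.choose (s + 1) * (s + 1) := (Nat.choose_succ_right_eq n s).symm
    have h4 : (n.choose s * (n - s)) / (s + 1) = n.choose (s + 1) := by
      rw [h3, Nat.mul_div_cancel _ (by omega)]
    rw [h1, h2, PySem.Int.floordiv_natCast, h4]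
    have : ((n - s : Nat) : Int) - 1 = ((n - (s + 1) : Nat) : Int) := by omega
    rw [this]

theorem binomial_eq_choose' (n k : Nat) :
    (if ¬(0 ≤ (k:Int) ∧ (k:Int) ≤ (n:Int)) then (0:Int)
     else ((PySem.List.pyRange 0 (min (k:Int) ((n:Int) - k)) 1).foldl
       (fun (s : Int × Int) t => (PySem.Int.floordiv (s.1 * s.2) (t + 1), s.2 - 1)) (1, (n:Int))).1)
    = (n.choose k : Int) := by
  by_cases h : k ≤ n
  · rw [if_neg (by omega)]
    have hmin : min (k:Int) ((n:Int) - k) = ((min k (n - k) : Nat) : Int) := by omega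
    rw [hmin, PySem.List.pyRange_zero_natCast, binom_loop n _ (by omega)]
    rcases Nat.le_total k (n - k) with h2 | h2
    · rw [min_eq_left h2]
    · rw [min_eq_right h2, Nat.choose_symm h]
  · rw [if_pos (by omega), Nat.choose_eq_zero_of_lt (by omega)]; simp

theorem bell_of_gt (n k : Nat) (x : List Int) (h : n < k) : bell n k x = 0 := by
  rw [bell]
  split_ifs with h1 h2
  · omega
  · rfl
  · have h0 : ((n : Int) - (k : Int) + 1).toNat = 0 := by omega
    rw [h0]
    rfl

theorem bell_sum (n k : Nat) (x : List Int) (hk : 1 ≤ k) (hn : k ≤ n) :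
    bell n k x = ((List.range (n - k + 1)).map
      (fun (i : Nat) => binomial ((n : Int) - 1) (i : Int) * x.getD i 0 * bell (n - i - 1) (k - 1) x)).sum := by
  rw [bell, if_neg (by omega), if_neg (by omega)]
  have h : ((n : Int) - k + 1).toNat = n - k + 1 := by omega
  rw [h, PySem.List.foldl_add]
  simp

theorem bell_take (n : Nat) : ∀ (k m : Nat) (x : List Int), 1 ≤ k → n - k < m →
    bell n k (x.take m) = bell n k x := by
  induction n using Nat.strong_induction_on with
  | _ n ih =>
    intro k m x hk h
    by_cases hkn : k ≤ n
    · rw [bell_sum n k _ hk hkn, bell_sum n k x hk hkn]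
      congr 1
      apply List.map_congr_left
      intro i hi
      rw [List.mem_range] at hi
      have hi' : i < m := by omega
      have hx : (x.take m).getD i 0 = x.getD i 0 := by
        rw [List.getD_eq_getElem?_getD, List.getD_eq_getElem?_getD, List.getElem?_take_of_lt hi']
      rw [hx]
      by_cases hk1 : k = 1
      · subst hk1; rw [bell_k_zero, bell_k_zero]
      · rw [ih (n - i - 1) (by omega) (k - 1) m x (by omega) (by omega)]
    · rw [bell_of_gt _ _ _ (by omega), bell_of_gt _ _ _ (by omega)]

def chooseRow (r : Nat) : List Int := (List.range (r + 1)).map (fun i => (r.choose i : Int))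

theorem pascal_partial (j : Nat) :
    (List.range j).foldl
      (fun C r1 =>
        let prev := C.getLastD []
        C ++ [(1 : Int) :: ((List.range r1).map (fun i0 => prev.getD i0 0 + prev.getD (i0 + 1) 0) ++ [1])])
      [[1]]
    = (List.range (j + 1)).map chooseRow := by
  induction j with
  | zero => simp [chooseRow]
  | succ j ih =>
    rw [List.range_succ, List.foldl_append, ih]
    simp only [List.foldl_cons, List.foldl_nil]
    have hlast : ((List.range (j + 1)).map chooseRow).getLastD [] = chooseRow j := by
      rw [List.range_succ, List.map_append]
      simp
    rw [hlast]
    have hrow : (1 : Int) :: ((List.range j).map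
        (fun i0 => (chooseRow j).getD i0 0 + (chooseRow j).getD (i0 + 1) 0) ++ [1]) = chooseRow (j + 1) := by
      have he : ∀ i0 ∈ List.range j,
          (chooseRow j).getD i0 0 + (chooseRow j).getD (i0 + 1) 0 = ((j + 1).choose (i0 + 1) : Int) := by
        intro i0 hi0
        rw [List.mem_range] at hi0
        unfold chooseRow
        rw [PySem.List.getD_map_range _ _ _ _ (by omega), PySem.List.getD_map_range _ _ _ _ (by omega)]
        rw [Nat.choose_succ_succ]
        push_cast; ring
      rw [List.map_congr_left he]
      unfold chooseRow
      rw [List.range_succ_eq_map, List.map_cons, List.map_map, List.range_succ, List.map_append]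
      simp [Nat.succ_eq_add_one, Function.comp]
    rw [hrow]
    simp [List.range_succ]

theorem pascalRows_eq (m : Nat) : pascalRows m = (List.range (m + 1)).map chooseRow :=
  pascal_partial m

theorem pascal_entry (m r i : Nat) (hr : r ≤ m) (hi : i ≤ r) :
    ((pascalRows m).getD r []).getD i 0 = (r.choose i : Int) := by
  rw [pascalRows_eq, PySem.List.getD_map_range _ _ _ _ (by omega)]
  unfold chooseRow
  rw [PySem.List.getD_map_range _ _ _ _ (by omega)]

theorem binomial_eq_choose (n k : Nat) : binomial (n : Int) (k : Int) = (n.choose k : Int) := by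
  unfold binomial
  exact binomial_eq_choose' n k

theorem bell_zero_zero (x : List Int) : bell 0 0 x = 1 := by rw [bell]; simp

theorem bellTable_partial (m : Nat) (x : List Int) (j : Nat) (hj : j ≤ m) :
    ((List.range j).foldl
      (fun T nn1 =>
        let nn := nn1 + 1
        T ++ [(0 : Int) :: (List.range m).map (fun kk1 =>
          let kk := kk1 + 1
          if kk ≤ nn then
            ((List.range (nn - kk + 1)).map (fun i =>
              ((pascalRows m).getD (nn - 1) []).getD i 0 * x.getD i 0 *
                (T.getD (nn - 1 - i) []).getD (kk - 1) 0)).sum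
          else 0)])
      [(1 : Int) :: List.replicate m 0]).length = j + 1 ∧
    ∀ nn kk : Nat, nn ≤ j → kk ≤ nn →
      ((((List.range j).foldl
          (fun T nn1 =>
            let nn := nn1 + 1
            T ++ [(0 : Int) :: (List.range m).map (fun kk1 =>
              let kk := kk1 + 1
              if kk ≤ nn then
                ((List.range (nn - kk + 1)).map (fun i =>
                  ((pascalRows m).getD (nn - 1) []).getD i 0 * x.getD i 0 *
                    (T.getD (nn - 1 - i) []).getD (kk - 1) 0)).sum
              else 0)])
          [(1 : Int) :: List.replicate m 0]).getD nn []).getD kk 0) = bell nn kk x := by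
  induction j with
  | zero =>
    refine ⟨by simp, ?_⟩
    intro nn kk hnn hkk
    interval_cases nn
    interval_cases kk
    simp [bell_zero_zero]
  | succ j ih =>
    have hj' : j ≤ m := by omega
    obtain ⟨ihlen, ihval⟩ := ih hj'
    rw [List.range_succ, List.foldl_append]
    set T := (List.range j).foldl _ _ with hT
    simp only [List.foldl_cons, List.foldl_nil]
    constructor
    · rw [List.length_append, ihlen]; rfl
    · intro nn kk hnn hkk
      by_cases hle : nn ≤ j
      · rw [List.getD_append _ _ _ _ (by omega)]
        exact ihval nn kk hle hkk
      · have hnn1 : nn = j + 1 := by omega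
        subst hnn1
        have happ : ∀ (r : List Int), (T ++ [r]).getD (j + 1) [] = r := by
          intro r
          rw [List.getD_eq_getElem?_getD, List.getElem?_append_right (by omega), ihlen]
          simp
        rw [happ]
        -- entry of the new row
        rcases Nat.eq_zero_or_pos kk with hkk0 | hkk1
        · subst hkk0
          rw [bell_k_zero]
          simp
        · have hkk' : kk - 1 < m := by omega
          rcases Nat.exists_eq_add_of_le hkk1 with ⟨kk1, hkkeq⟩
          have : kk = kk1 + 1 := by omega
          subst this
          simp only [List.getD_cons_succ]
          rw [PySem.List.getD_map_range _ _ _ _ (by omega)]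
          simp only [if_pos (show kk1 + 1 ≤ j + 1 by omega)]
          rw [bell_sum (j + 1) (kk1 + 1) x (by omega) (by omega)]
          apply congrArg List.sum
          apply List.map_congr_left
          intro i hi
          rw [List.mem_range] at hi
          have hC : ((pascalRows m).getD (j + 1 - 1) []).getD i 0 = (((j + 1 - 1).choose i : Nat) : Int) :=
            pascal_entry m _ i (by omega) (by omega)
          have hB : binomial ((j + 1 : Nat) - 1) (i : Int) = (((j + 1 - 1).choose i : Nat) : Int) := by
            have hcast : ((j + 1 : Nat) : Int) - 1 = ((j + 1 - 1 : Nat) : Int) := by omega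
            rw [hcast, binomial_eq_choose]
          rw [hC, hB]
          have hidx : j + 1 - 1 - i = j + 1 - i - 1 := by omega
          rw [hidx]
          simp only [Nat.add_sub_cancel]
          rw [ihval (j + 1 - i - 1) kk1 (by omega) (by omega)]

theorem bellTable_getD (m : Nat) (x : List Int) (nn kk : Nat) (hnn : nn ≤ m) (hkk : kk ≤ nn) :
    ((bellTable (pascalRows m) x m).getD nn []).getD kk 0 = bell nn kk x := by
  unfold bellTable
  exact (bellTable_partial m x m le_rfl).2 nn kk hnn hkk

theorem main_equal (f g : List Int) (hne : f ≠ []) :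
    composition_rule f g = composition_rule_alt f g := by
  cases f with
  | nil => exact absurd rfl hne
  | cons f0 ft =>
    unfold composition_rule composition_rule_alt
    simp only [List.length_cons, Nat.add_sub_cancel, List.drop_one, List.tail_cons]
    congr 1
    apply List.map_congr_left
    intro j hj
    rw [List.mem_range] at hj
    unfold composition_rule_nth
    have hlen' : (ft.take (j + 1)).length = j + 1 := by
      rw [List.length_take]; omega
    rw [hlen', PySem.List.foldl_add]
    simp only [zero_add]
    apply congrArg List.sum
    apply List.map_congr_left
    intro k0 hk0
    rw [List.mem_range] at hk0
    have h1 : (ft.take (j + 1)).getD k0 0 = (f0 :: ft).getD (k0 + 1) 0 := by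
      rw [List.getD_cons_succ, List.getD_eq_getElem?_getD, List.getD_eq_getElem?_getD,
        List.getElem?_take_of_lt hk0]
    have h2 : (g.tail.take (j + 1)).take (j + 1 - k0) = g.tail.take (j + 1 - k0) := by
      rw [List.take_take, min_eq_left (by omega)]
    rw [h1, h2, bell_take (j + 1) (k0 + 1) (j + 1 - k0) g.tail (by omega) (by omega)]
    rw [bellTable_getD ft.length g.tail (j + 1) (k0 + 1) (by omega) (by omega)]

-- ===== VERDICT (by name: the statement is the Claim_ definition above) =====
theorem composition_rule_spec : Claim_equal_composition_rule := by
  unfold Claim_equal_composition_rule Spec_composition_rule Pre_composition_rule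
  intro f g _ hpre
  exact main_equal f g hpre.2
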